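-- pv_equiv track=rewrite | github.com/mischarucquoiberger-collab/LLM1.0 | app/services/directors.py | _match_name_to_result
-- ===== SOURCE A (Python) =====
-- def _match_name_to_result(director_names: list[str], text_blob: str,
--                            existing_map: dict[str, str]) -> str | None:
--     """Match a SERP result to a director name using first+last name matching."""
--     text_blob = text_blob.lower()
--     best_match = None
--     best_score = 0
--     for name in director_names:
--         if name in existing_map:
--             continue
--         parts = name.lower().split()
--         if len(parts) < 2:
--             continue
--         first = parts[0]
--         last = parts[-1]
--         if first in text_blob and last in text_blob:
--             score = len(name)
--             if score > best_score:
--                 best_score = score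
--                 best_match = name
--     return best_match
-- ===== SOURCE B (Python) =====
-- def _match_name_to_result(director_names: list[str], text_blob: str,
--                           existing_map: dict[str, str]) -> str | None:
--     """Sort-then-first-hit: sort eligible names by descending length (stable),
--     return the first whose first and last token occur in the lowered text."""
--     text = text_blob.lower()
--     candidates = [n for n in director_names
--                   if n not in existing_map and len(n.lower().split()) >= 2]
--     candidates.sort(key=len, reverse=True)  # stable: ties keep original order
--     for name in candidates:
--         parts = name.lower().split()
--         if parts[0] in text and parts[-1] in text:
--             return name
--     return None
-- ===== Notes on version B (the rewrite author's own statement) =====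
-- stated objective: alternative
-- what changed: Replaces the single-pass max-score tracking loop with filter eligible names, stable sort by descending length, and return the first sorted name whose first and last token occur in the text.
import Mathlib
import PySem

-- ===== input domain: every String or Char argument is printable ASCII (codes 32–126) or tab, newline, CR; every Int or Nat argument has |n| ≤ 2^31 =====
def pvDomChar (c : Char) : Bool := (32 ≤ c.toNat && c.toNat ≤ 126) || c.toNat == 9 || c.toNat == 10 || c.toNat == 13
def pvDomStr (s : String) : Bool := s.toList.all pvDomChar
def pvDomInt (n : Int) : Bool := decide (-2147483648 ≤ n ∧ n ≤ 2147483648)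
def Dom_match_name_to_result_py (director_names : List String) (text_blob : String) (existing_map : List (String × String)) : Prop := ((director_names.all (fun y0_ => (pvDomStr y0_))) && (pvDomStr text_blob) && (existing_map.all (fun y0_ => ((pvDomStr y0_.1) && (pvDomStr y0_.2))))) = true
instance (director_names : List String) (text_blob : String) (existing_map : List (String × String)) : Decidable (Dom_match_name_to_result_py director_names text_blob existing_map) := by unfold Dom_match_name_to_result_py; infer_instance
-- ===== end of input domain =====

-- B replaces A's max-score tracking scan by filter + stable descending-length sort + first hit (alternative decomposition, same results).

-- ===== PORT A =====
-- A's loop body, named so the proofs can speak about one iteration; parts[0] / parts[-1] are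
-- ported as headD "" / getLastD "": the guard `parts.length < 2` has already ensured parts is
-- nonempty, so these are exactly Python's parts[0] / parts[-1] here.
def pyStepA (existing_map : List (String × String)) (text : String)
    (st : Option String × Int) (name : String) : Option String × Int :=
  if (PySem.Dict.mk existing_map).contains name then st
  else
    let parts := PySem.Str.split₀ (PySem.Str.lower name)
    if parts.length < 2 then st
    else
      let first := parts.headD ""
      let last := parts.getLastD ""
      if PySem.Str.isIn first text && PySem.Str.isIn last text then
        let score := PySem.Str.len name
        if st.2 < score then (some name, score) else st
      else st

def match_name_to_result_py (director_names : List String) (text_blob : String) (existing_map : List (String × String)) : Option String :=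
  let text := PySem.Str.lower text_blob
  let r := director_names.foldl (pyStepA existing_map text) (none, 0)
  r.1

-- ===== PORT B =====
def match_name_to_result_py_alt (director_names : List String) (text_blob : String) (existing_map : List (String × String)) : Option String :=
  let text := PySem.Str.lower text_blob
  let candidates := director_names.filter (fun n =>
    !(PySem.Dict.mk existing_map).contains n
      && decide (2 ≤ (PySem.Str.split₀ (PySem.Str.lower n)).length))
  let ordered := PySem.List.sorted candidates (fun n => PySem.Str.len n) true
  ordered.find? (fun name =>
    let parts := PySem.Str.split₀ (PySem.Str.lower name)
    PySem.Str.isIn (parts.headD "") text && PySem.Str.isIn (parts.getLastD "") text)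

-- ===== PRECONDITION & SPEC =====
def Spec_match_name_to_result_py (director_names : List String) (text_blob : String) (existing_map : List (String × String)) (out : Option String) : Prop := out = match_name_to_result_py_alt director_names text_blob existing_map
instance (director_names : List String) (text_blob : String) (existing_map : List (String × String)) (out : Option String) : Decidable (Spec_match_name_to_result_py director_names text_blob existing_map out) := by unfold Spec_match_name_to_result_py; infer_instance

-- ===== CLAIM (what is proved, stated in full; the proofs are below) =====
def Claim_equal_match_name_to_result_py : Prop := ∀ (director_names : List String) (text_blob : String) (existing_map : List (String × String)), Dom_match_name_to_result_py director_names text_blob existing_map → Spec_match_name_to_result_py director_names text_blob existing_map (match_name_to_result_py director_names text_blob existing_map)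

-- ===== LEMMAS AND PROOFS =====

-- the match predicate both programs test (defeq to B's find? predicate)
def pvMtch (text : String) (name : String) : Bool :=
  let parts := PySem.Str.split₀ (PySem.Str.lower name)
  PySem.Str.isIn (parts.headD "") text && PySem.Str.isIn (parts.getLastD "") text

-- eligibility test (defeq to B's filter predicate)
def pvElig (existing_map : List (String × String)) (n : String) : Bool :=
  !(PySem.Dict.mk existing_map).contains n
    && decide (2 ≤ (PySem.Str.split₀ (PySem.Str.lower n)).length)

-- the score A keeps for a running best (generic over the score function f)
def pvScore {α : Type} (f : α → Int) (b : Option α) : Int :=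
  match b with
  | none => 0
  | some m => f m

-- A's step over the eligible names only, in abstract form
def pvStepA {α : Type} (p : α → Bool) (f : α → Int) (st : Option α × Int) (n : α) : Option α × Int :=
  if p n && decide (st.2 < f n) then (some n, f n) else st

-- a name with at least one word is nonempty
theorem pvLen_pos_of_words {n : String}
    (h : 1 ≤ (PySem.Str.split₀ (PySem.Str.lower n)).length) : 0 < PySem.Str.len n := by
  have h1 : (PySem.Str.split₀ (PySem.Str.lower n)).length
      = (PySem.Chars.split₀ (PySem.Chars.lower n.toList)).length := by
    calc (PySem.Str.split₀ (PySem.Str.lower n)).length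
        = (List.map String.toList (PySem.Str.split₀ (PySem.Str.lower n))).length := by
          rw [List.length_map]
      _ = (PySem.Chars.split₀ (PySem.Chars.lower n.toList)).length := by
          rw [PySem.Str.split₀_map_toList, PySem.Str.toList_lower]
  rcases hcs : n.toList with _ | ⟨c, cs⟩
  · rw [hcs] at h1; rw [h1] at h
    have h0 : (PySem.Chars.split₀ (PySem.Chars.lower ([] : List Char))).length = 0 := by decide
    omega
  · have hpos : 0 < n.toList.length := by rw [hcs]; simp
    have hlen : PySem.Str.len n = (n.toList.length : Int) := by simp [PySem.Str.len_eq]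
    rw [hlen]; omega

-- inserting n into a descending list: the first match is n iff n matches and beats the old best
theorem pvFind_insertBy {α : Type} (p : α → Bool) (f : α → Int) (n : α) (L : List α)
    (hdesc : L.Pairwise (fun a b => f b ≤ f a))
    (hn : p n = true → 0 < f n) :
    (PySem.List.insertBy (fun a b => decide (f b < f a)) n L).find? p
      = if p n && decide (pvScore f (L.find? p) < f n) then some n else L.find? p := by
  induction L with
  | nil =>
    cases hpn : p n with
    | false => simp [PySem.List.insertBy, List.find?, hpn]
    | true =>
      have h0 : 0 < f n := hn hpn
      have hsc : pvScore f (none : Option α) < f n := by simpa [pvScore] using h0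
      simp [PySem.List.insertBy, List.find?, hpn, hsc]
  | cons y ys ih =>
    rcases List.pairwise_cons.mp hdesc with ⟨hy, hys⟩
    by_cases hb : f y < f n
    · have hins : PySem.List.insertBy (fun a b => decide (f b < f a)) n (y :: ys)
          = n :: y :: ys := by simp [PySem.List.insertBy, hb]
      rw [hins]
      cases hpn : p n with
      | false => simp [List.find?, hpn]
      | true =>
        have hsc : pvScore f (List.find? p (y :: ys)) < f n := by
          rcases hf : List.find? p (y :: ys) with _ | m
          · simpa [pvScore] using hn hpn
          · have hmem := List.mem_of_find?_eq_some hf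
            rcases List.mem_cons.mp hmem with h | h
            · subst h; simpa [pvScore] using hb
            · have := hy m h
              simp only [pvScore]
              omega
        rw [List.find?_cons_of_pos hpn]
        simp [hsc]
    · have hins : PySem.List.insertBy (fun a b => decide (f b < f a)) n (y :: ys)
          = y :: PySem.List.insertBy (fun a b => decide (f b < f a)) n ys := by
        simp [PySem.List.insertBy, hb]
      rw [hins]
      cases hpy : p y with
      | true =>
        rw [List.find?_cons_of_pos hpy, List.find?_cons_of_pos hpy]
        have hc : (p n && decide (pvScore f (some y) < f n)) = false := by
          simp only [pvScore, Bool.and_eq_false_iff, decide_eq_false_iff_not]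
          right; omega
        rw [hc]
        simp
      | false =>
        rw [List.find?_cons_of_neg (by simp [hpy]), List.find?_cons_of_neg (by simp [hpy])]
        exact ih hys

-- insertBy into a descending list stays descending
theorem pvInsertBy_pairwise {α : Type} (f : α → Int) (n : α) (L : List α)
    (hdesc : L.Pairwise (fun a b => f b ≤ f a)) :
    (PySem.List.insertBy (fun a b => decide (f b < f a)) n L).Pairwise (fun a b => f b ≤ f a) := by
  induction L with
  | nil => simp [PySem.List.insertBy]
  | cons y ys ih =>
    rcases List.pairwise_cons.mp hdesc with ⟨hy, hys⟩
    by_cases hb : f y < f n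
    · have hins : PySem.List.insertBy (fun a b => decide (f b < f a)) n (y :: ys)
          = n :: y :: ys := by simp [PySem.List.insertBy, hb]
      rw [hins]
      refine List.pairwise_cons.mpr ⟨?_, hdesc⟩
      intro m hm
      rcases List.mem_cons.mp hm with h | h
      · subst h; omega
      · have := hy m h; omega
    · have hins : PySem.List.insertBy (fun a b => decide (f b < f a)) n (y :: ys)
          = y :: PySem.List.insertBy (fun a b => decide (f b < f a)) n ys := by
        simp [PySem.List.insertBy, hb]
      rw [hins]
      refine List.pairwise_cons.mpr ⟨?_, ih hys⟩
      intro m hm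
      rcases (PySem.List.mem_insertBy _ _ _ _).mp hm with h | h
      · subst h; omega
      · exact hy m h

-- the loop invariant: A's running pair is (first match of the sorted-so-far list, its score)
theorem pvFold_inv {α : Type} (p : α → Bool) (f : α → Int) (xs : List α) (L : List α)
    (st : Option α × Int)
    (h1 : st.1 = L.find? p)
    (h2 : st.2 = pvScore f st.1)
    (hdesc : L.Pairwise (fun a b => f b ≤ f a))
    (hposX : ∀ n ∈ xs, 0 < f n) :
    (xs.foldl (pvStepA p f) st).1
      = (xs.foldl (fun acc x => PySem.List.insertBy (fun a b => decide (f b < f a)) x acc) L).find? p := by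
  induction xs generalizing L st with
  | nil => simpa using h1
  | cons n xs ih =>
    have hn : 0 < f n := hposX n (List.mem_cons_self ..)
    have hfind := pvFind_insertBy p f n L hdesc (fun _ => hn)
    simp only [List.foldl_cons]
    refine ih (PySem.List.insertBy _ n L) (pvStepA p f st n) ?_ ?_
      (pvInsertBy_pairwise f n L hdesc) (fun m hm => hposX m (List.mem_cons_of_mem n hm))
    · rw [hfind]
      simp only [pvStepA, h2, h1]
      by_cases hcb : (p n && decide (pvScore f (List.find? p L) < f n)) = true
      · simp only [if_pos hcb]
      · simp only [if_neg hcb]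
        exact h1
    · simp only [pvStepA]
      split
      · simp [pvScore]
      · exact h2

-- A's guarded fold is the abstract fold over the filtered list
theorem pvFold_filter (text : String) (em : List (String × String)) (xs : List String)
    (st : Option String × Int) :
    xs.foldl (pyStepA em text) st
      = (xs.filter (pvElig em)).foldl (pvStepA (pvMtch text) PySem.Str.len) st := by
  induction xs generalizing st with
  | nil => rfl
  | cons n xs ih =>
    by_cases hc : (PySem.Dict.mk em).contains n = true
    · have he : pvElig em n = false := by simp [pvElig, hc]
      rw [List.filter_cons_of_neg (by simp [he])]
      simp only [List.foldl_cons]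
      rw [ih]
      congr 1
      simp [pyStepA, hc]
    · by_cases hl : (PySem.Str.split₀ (PySem.Str.lower n)).length < 2
      · have he : pvElig em n = false := by
          simp [pvElig, hc]
          omega
        rw [List.filter_cons_of_neg (by simp [he])]
        simp only [List.foldl_cons]
        rw [ih]
        congr 1
        simp [pyStepA, hc, hl]
      · have he : pvElig em n = true := by
          simp [pvElig, hc]
          omega
        rw [List.filter_cons_of_pos he]
        simp only [List.foldl_cons]
        rw [ih]
        have hstep : pyStepA em text st n = pvStepA (pvMtch text) PySem.Str.len st n := by
          simp only [pyStepA, pvStepA, if_neg hc, if_neg hl]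
          rw [show (PySem.Str.isIn ((PySem.Str.split₀ (PySem.Str.lower n)).headD "") text
                && PySem.Str.isIn ((PySem.Str.split₀ (PySem.Str.lower n)).getLastD "") text)
              = pvMtch text n from rfl]
          cases hm : pvMtch text n with
          | false => simp
          | true => simp
        rw [hstep]

-- ===== VERDICT (by name: the statement is the Claim_ definition above) =====
theorem match_name_to_result_py_spec : Claim_equal_match_name_to_result_py := by
  intro dn tb em _
  unfold Spec_match_name_to_result_py
  have hA : match_name_to_result_py dn tb em
      = (dn.foldl (pyStepA em (PySem.Str.lower tb)) (none, 0)).1 := rfl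
  have hB : match_name_to_result_py_alt dn tb em
      = (PySem.List.sorted (dn.filter (pvElig em)) (fun n => PySem.Str.len n) true).find?
          (pvMtch (PySem.Str.lower tb)) := rfl
  rw [hA, hB, pvFold_filter, PySem.List.sorted_rev_eq_foldl_insertBy]
  refine pvFold_inv (pvMtch (PySem.Str.lower tb)) PySem.Str.len (dn.filter (pvElig em)) [] (none, 0)
    rfl rfl List.Pairwise.nil ?_
  intro n hn
  have he : pvElig em n = true := List.of_mem_filter hn
  simp only [pvElig, Bool.and_eq_true, decide_eq_true_eq] at he
  exact pvLen_pos_of_words (by omega)
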